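-- pv_equiv track=rewrite | github.com/jeongYuri/coding-test-solution | 백준/Silver/17626. Four Squares/Four Squares.py | solve
-- ===== SOURCE A (Python) =====
-- import math
--
-- def is_square(n):
--     return int(math.sqrt(n))**2 == n
--
-- def solve(n):
--     if is_square(n):
--         return 1
--     for i in range(1, int(math.sqrt(n)) + 1):
--         if is_square(n - i*i):
--             return 2
--     while n % 4 == 0:
--         n //= 4
--     if n % 8 == 7:
--         return 4
--     return 3
-- ===== SOURCE B (Python) =====
-- import math
--
-- def solve(n):
--     r = math.isqrt(n)
--     if r * r == n:
--         return 1
--     # two-pointer search for a representation n = a^2 + b^2 with 1 <= a <= b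
--     a, b = 1, r
--     while a <= b:
--         s = a * a + b * b
--         if s == n:
--             return 2
--         if s < n:
--             a += 1
--         else:
--             b -= 1
--     # Legendre: answer 4 iff n = 4^k * (8m+7) iff the odd part is 7 mod 8 and
--     # the number of trailing factors of 2 is even
--     m, t = n, 0
--     while m % 2 == 0:
--         m //= 2
--         t += 1
--     return 4 if t % 2 == 0 and m % 8 == 7 else 3
-- ===== Notes on version B (the rewrite author's own statement) =====
-- stated objective: alternative
-- what changed: The sum-of-two-squares case is decided by a two-pointer meet-in-the-middle walk instead of A's scan that takes a float sqrt per candidate, and Legendre's 4^k(8m+7) test is done by counting trailing factors of 2 and checking the parity of that count together with the odd part mod 8, instead of A's divide-by-4 stripping loop.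
import Mathlib
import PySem

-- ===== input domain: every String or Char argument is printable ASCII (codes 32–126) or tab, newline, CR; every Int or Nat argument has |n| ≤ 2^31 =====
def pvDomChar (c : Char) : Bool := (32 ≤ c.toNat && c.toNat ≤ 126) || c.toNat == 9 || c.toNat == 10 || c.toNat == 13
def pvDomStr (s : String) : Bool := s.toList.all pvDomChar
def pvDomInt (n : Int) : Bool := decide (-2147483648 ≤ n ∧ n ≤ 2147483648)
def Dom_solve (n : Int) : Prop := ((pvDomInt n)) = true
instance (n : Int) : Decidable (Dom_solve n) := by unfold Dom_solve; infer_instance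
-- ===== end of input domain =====

-- B replaces A's per-candidate float-sqrt scan for the two-square case by a two-pointer walk,
-- and A's divide-by-4 stripping loop by counting trailing factors of 2 (parity + odd part mod 8).
-- Equivalence is about the return value; neither program mutates its argument.

-- ===== PORT A =====
-- is_square: int(math.sqrt(n)) equals the integer square root for 0 ≤ n ≤ 2^31 (the double sqrt's
-- error is far below the gap 1/(2·sqrt n)); for n < 0 math.sqrt raises, excluded by Pre_.
def isSquare (n : Int) : Bool := (((Int.toNat n).sqrt : Int)) ^ 2 == n

-- while n % 4 == 0: n //= 4 — the '0 < n' conjunct and the fuel only make the recursion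
-- total (Python diverges at n = 0, unreachable: 0 is a perfect square and returns 1 earlier;
-- the fuel n.toNat + 1 bounds the number of divisions by 4 and is never exhausted).
def stripAGo : Nat → Int → Int
  | 0, n => n
  | f + 1, n =>
    if 0 < n ∧ PySem.Int.mod n 4 = 0 then stripAGo f (PySem.Int.floordiv n 4) else n

def stripA (n : Int) : Int := stripAGo (n.toNat + 1) n

def solve (n : Int) : Int :=
  if isSquare n then 1
  else if (PySem.List.pyRange 1 (((Int.toNat n).sqrt : Int) + 1) 1).any
            (fun i => isSquare (n - i * i)) then 2
  else if PySem.Int.mod (stripA n) 8 == 7 then 4 else 3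

-- ===== PORT B =====
-- while a <= b: s = a*a + b*b; == n → return 2; < n → a += 1; else b -= 1
-- (fuel = the window width b+1-a, the exact number of loop steps; only for totality)
def twoPtrGo (n : Int) : Nat → Int → Int → Bool
  | 0, _, _ => false
  | f + 1, a, b =>
    if a ≤ b then
      if a * a + b * b == n then true
      else if a * a + b * b < n then twoPtrGo n f (a + 1) b
      else twoPtrGo n f a (b - 1)
    else false

def twoPtr (n a b : Int) : Bool := twoPtrGo n (b + 1 - a).toNat a b

-- m, t = n, 0; while m % 2 == 0: m //= 2; t += 1 — '0 < m' and the fuel again only for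
-- totality (m = 0 unreachable, the fuel m.toNat + 1 is never exhausted).
def stripBGo : Nat → Int → Int → Int × Int
  | 0, m, t => (m, t)
  | f + 1, m, t =>
    if 0 < m ∧ PySem.Int.mod m 2 = 0 then stripBGo f (PySem.Int.floordiv m 2) (t + 1) else (m, t)

def stripB (m t : Int) : Int × Int := stripBGo (m.toNat + 1) m t

def solve_alt (n : Int) : Int :=
  let r : Int := ((Int.toNat n).sqrt : Int)
  if r * r == n then 1
  else if twoPtr n 1 r then 2
  else
    let p := stripB n 0
    if PySem.Int.mod p.2 2 == 0 && PySem.Int.mod p.1 8 == 7 then 4 else 3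

-- ===== PRECONDITION & SPEC =====
-- Pre_ excludes n < 0, on which A raises ValueError (math.sqrt of a negative number).
def Pre_solve (n : Int) : Prop := 0 ≤ n
instance (n : Int) : Decidable (Pre_solve n) := by unfold Pre_solve; infer_instance
def pvWitness_solve : Int := 7

def Spec_solve (n : Int) (out : Int) : Prop := out = solve_alt n
instance (n : Int) (out : Int) : Decidable (Spec_solve n out) := by unfold Spec_solve; infer_instance

-- ===== CLAIM (what is proved, stated in full; the proofs are below) =====
def Claim_equal_solve : Prop := ∀ (n : Int), Dom_solve n → Pre_solve n → Spec_solve n (solve n)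

-- ===== LEMMAS AND PROOFS =====

-- "n is a sum of two positive squares with both parts ≤ sqrt n" — the condition both
-- middle branches decide.
def TwoSq (N : Nat) : Prop := ∃ x y : Nat, 1 ≤ x ∧ x ≤ y ∧ y ≤ Nat.sqrt N ∧ x * x + y * y = N

theorem isSquare_natCast (m : Nat) :
    isSquare (m : Int) = true ↔ Nat.sqrt m * Nat.sqrt m = m := by
  simp [isSquare, pow_two]
  constructor
  · intro h; exact_mod_cast h
  · intro h; exact_mod_cast h

theorem sqrt_exact_of_sq (j m : Nat) (h : j * j = m) : Nat.sqrt m * Nat.sqrt m = m := by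
  subst h; rw [Nat.sqrt_eq]

-- two-pointer invariant: the walk finds a pair iff one exists in the live rectangle
theorem twoPtrGo_iff (N : Nat) (f : Nat) :
    ∀ a b : Int, 0 ≤ a → (b + 1 - a).toNat ≤ f →
      (twoPtrGo (N : Int) f a b = true ↔
        ∃ x y : Int, a ≤ x ∧ x ≤ y ∧ y ≤ b ∧ x * x + y * y = (N : Int)) := by
  induction f with
  | zero =>
    intro a b ha hf
    simp only [twoPtrGo, Bool.false_eq_true, false_iff]
    rintro ⟨x, y, hx, hxy, hyb, _⟩
    omega
  | succ f ih =>
    intro a b ha hf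
    simp only [twoPtrGo]
    by_cases hab : a ≤ b
    · rw [if_pos hab]
      by_cases heq : (a * a + b * b == (N : Int)) = true
      · rw [if_pos heq]
        simp only [true_iff]
        rw [beq_iff_eq] at heq
        exact ⟨a, b, le_refl a, hab, le_refl b, heq⟩
      · rw [if_neg heq]
        by_cases hlt : a * a + b * b < (N : Int)
        · rw [if_pos hlt, ih (a + 1) b (by omega) (by omega)]
          constructor
          · rintro ⟨x, y, hx, hxy, hyb, hsum⟩
            exact ⟨x, y, by omega, hxy, hyb, hsum⟩
          · rintro ⟨x, y, hx, hxy, hyb, hsum⟩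
            refine ⟨x, y, ?_, hxy, hyb, hsum⟩
            rcases lt_or_ge a x with h | h
            · omega
            · exfalso
              have hxa : x = a := le_antisymm h hx
              subst hxa
              have h1 : y * y ≤ b * b := mul_self_le_mul_self (by omega) hyb
              linarith
        · rw [if_neg hlt, ih a (b - 1) ha (by omega)]
          constructor
          · rintro ⟨x, y, hx, hxy, hyb, hsum⟩
            exact ⟨x, y, hx, hxy, by omega, hsum⟩
          · rintro ⟨x, y, hx, hxy, hyb, hsum⟩
            refine ⟨x, y, hx, hxy, ?_, hsum⟩
            rcases lt_or_ge y b with h | h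
            · omega
            · exfalso
              have hyb' : y = b := le_antisymm hyb h
              subst hyb'
              simp only [beq_iff_eq] at heq
              have h1 : a * a ≤ x * x := mul_self_le_mul_self ha hx
              exact heq (le_antisymm (by linarith) (not_lt.mp hlt))
    · rw [if_neg hab]
      simp only [Bool.false_eq_true, false_iff]
      rintro ⟨x, y, hx, hxy, hyb, _⟩
      omega

theorem scan_iff_twoSq (N : Nat) (hns : ¬ Nat.sqrt N * Nat.sqrt N = N) :
    ((PySem.List.pyRange 1 (((Nat.sqrt N : Int)) + 1) 1).any
        (fun i => isSquare ((N : Int) - i * i)) = true) ↔ TwoSq N := by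
  rw [List.any_eq_true]
  constructor
  · rintro ⟨i, hi, hsq⟩
    rw [PySem.List.mem_pyRange_one] at hi
    obtain ⟨x, rfl⟩ : ∃ x : Nat, i = (x : Int) :=
      ⟨i.toNat, (Int.toNat_of_nonneg (by omega)).symm⟩
    have hx1 : 1 ≤ x := by exact_mod_cast hi.1
    have hxs : x ≤ Nat.sqrt N := by
      have : (x : Int) < (Nat.sqrt N : Int) + 1 := hi.2
      omega
    have hxx : x * x ≤ N := Nat.le_sqrt.mp hxs
    have hcast : ((N : Int) - (x : Int) * (x : Int)) = ((N - x * x : Nat) : Int) := by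
      push_cast [hxx]; ring
    rw [hcast, isSquare_natCast] at hsq
    have hj : Nat.sqrt (N - x * x) * Nat.sqrt (N - x * x) = N - x * x := hsq
    set j := Nat.sqrt (N - x * x) with hjdef
    have hj0 : j ≠ 0 := by
      intro h0
      rw [h0] at hj
      exact hns (sqrt_exact_of_sq x N (by omega))
    have hsum : x * x + j * j = N := by omega
    rcases le_total x j with h | h
    · exact ⟨x, j, hx1, h, Nat.le_sqrt.mpr (by nlinarith), hsum⟩
    · exact ⟨j, x, by omega, h, Nat.le_sqrt.mpr (by nlinarith), by omega⟩
  · rintro ⟨x, y, hx1, hxy, hys, hsum⟩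
    refine ⟨(x : Int), ?_, ?_⟩
    · rw [PySem.List.mem_pyRange_one]
      constructor
      · exact_mod_cast hx1
      · have : x ≤ Nat.sqrt N := le_trans hxy hys
        omega
    · have hxx : x * x ≤ N := by nlinarith
      have hcast : ((N : Int) - (x : Int) * (x : Int)) = ((N - x * x : Nat) : Int) := by
        push_cast [hxx]; ring
      rw [hcast, isSquare_natCast]
      exact sqrt_exact_of_sq y (N - x * x) (by omega)

theorem twoPtr_iff_twoSq (N : Nat) :
    (twoPtr (N : Int) 1 (Nat.sqrt N : Int) = true) ↔ TwoSq N := by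
  rw [twoPtr, twoPtrGo_iff N _ 1 (Nat.sqrt N : Int) (by omega) (le_refl _)]
  constructor
  · rintro ⟨x, y, hx, hxy, hyb, hsum⟩
    obtain ⟨x', rfl⟩ : ∃ x' : Nat, x = (x' : Int) :=
      ⟨x.toNat, (Int.toNat_of_nonneg (by omega)).symm⟩
    obtain ⟨y', rfl⟩ : ∃ y' : Nat, y = (y' : Int) :=
      ⟨y.toNat, (Int.toNat_of_nonneg (by omega)).symm⟩
    exact ⟨x', y', by exact_mod_cast hx, by exact_mod_cast hxy, by exact_mod_cast hyb,
      by exact_mod_cast hsum⟩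
  · rintro ⟨x, y, hx1, hxy, hys, hsum⟩
    exact ⟨(x : Int), (y : Int), by exact_mod_cast hx1, by exact_mod_cast hxy,
      by exact_mod_cast hys, by exact_mod_cast hsum⟩

theorem mod_natCast4 (m : Nat) : PySem.Int.mod (m : Int) 4 = ((m % 4 : Nat) : Int) := by
  rw [PySem.Int.mod_eq_emod_of_pos (by norm_num)]
  push_cast
  rfl

theorem mod_natCast2 (m : Nat) : PySem.Int.mod (m : Int) 2 = ((m % 2 : Nat) : Int) := by
  rw [PySem.Int.mod_eq_emod_of_pos (by norm_num)]
  push_cast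
  rfl

theorem mod_natCast8 (m : Nat) : PySem.Int.mod (m : Int) 8 = ((m % 8 : Nat) : Int) := by
  rw [PySem.Int.mod_eq_emod_of_pos (by norm_num)]
  push_cast
  rfl

theorem floordiv_natCast4 (m : Nat) :
    PySem.Int.floordiv (m : Int) 4 = ((m / 4 : Nat) : Int) := by
  rw [PySem.Int.floordiv_eq_ediv_of_pos (by norm_num)]
  push_cast
  rfl

theorem floordiv_natCast2 (m : Nat) :
    PySem.Int.floordiv (m : Int) 2 = ((m / 2 : Nat) : Int) := by
  rw [PySem.Int.floordiv_eq_ediv_of_pos (by norm_num)]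
  push_cast
  rfl

theorem stripAGo_pow (t : Nat) (d : Nat) (hd : d % 2 = 1) :
    ∀ f : Nat, 2 ^ t * d < f →
      stripAGo f ((2 ^ t * d : Nat) : Int) =
        if t % 2 = 0 then (d : Int) else ((2 * d : Nat) : Int) := by
  induction t using Nat.strong_induction_on with
  | _ t ih =>
    match t with
    | 0 =>
      intro f hf
      match f, hf with
      | f + 1, _ =>
        rw [stripAGo, if_neg]
        · simp
        · rw [mod_natCast4]
          simp only [pow_zero, one_mul]
          omega
    | 1 =>
      intro f hf
      match f, hf with
      | f + 1, _ =>
        rw [stripAGo, if_neg]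
        · norm_num
        · rw [mod_natCast4]
          have : (2 ^ 1 * d) % 4 = 2 := by omega
          rw [this]
          omega
    | (k + 2) =>
      intro f hf
      have hk1 : 1 ≤ 2 ^ k * d := Nat.mul_pos (Nat.two_pow_pos _) (by omega)
      have h4 : 2 ^ (k + 2) * d = 2 ^ k * d * 4 := by ring
      match f, (by omega : 0 < f) with
      | f + 1, _ =>
        rw [stripAGo, if_pos, floordiv_natCast4]
        · have hq : 2 ^ (k + 2) * d / 4 = 2 ^ k * d := by
            rw [h4]
            exact Nat.mul_div_cancel _ (by norm_num)
          rw [hq, ih k (by omega) f (by omega)]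
          have : (k + 2) % 2 = k % 2 := by omega
          rw [this]
        · constructor
          · have : 0 < 2 ^ (k + 2) * d := by omega
            omega
          · rw [mod_natCast4]
            have : 2 ^ (k + 2) * d % 4 = 0 := by
              rw [h4]
              exact Nat.mul_mod_left _ _
            rw [this]
            rfl

theorem stripA_pow (t d : Nat) (hd : d % 2 = 1) :
    stripA ((2 ^ t * d : Nat) : Int) =
      if t % 2 = 0 then (d : Int) else ((2 * d : Nat) : Int) := by
  rw [stripA, Int.toNat_natCast]
  exact stripAGo_pow t d hd _ (by omega)

theorem stripBGo_pow (t : Nat) (d : Nat) (hd : d % 2 = 1) :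
    ∀ (f : Nat) (s : Int), 2 ^ t * d < f →
      stripBGo f ((2 ^ t * d : Nat) : Int) s = ((d : Int), s + t) := by
  induction t with
  | zero =>
    intro f s hf
    match f, hf with
    | f + 1, _ =>
      rw [stripBGo, if_neg]
      · simp
      · rw [mod_natCast2]
        simp only [pow_zero, one_mul]
        omega
  | succ k ih =>
    intro f s hf
    have hk1 : 1 ≤ 2 ^ k * d := Nat.mul_pos (Nat.two_pow_pos _) (by omega)
    have h2 : 2 ^ (k + 1) * d = 2 ^ k * d * 2 := by ring
    match f, (by omega : 0 < f) with
    | f + 1, _ =>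
      rw [stripBGo, if_pos, floordiv_natCast2]
      · have hq : 2 ^ (k + 1) * d / 2 = 2 ^ k * d := by
          rw [h2]
          exact Nat.mul_div_cancel _ (by norm_num)
        rw [hq, ih f (s + 1) (by omega)]
        congr 1
        push_cast
        ring
      · constructor
        · have : 0 < 2 ^ (k + 1) * d := by omega
          omega
        · rw [mod_natCast2]
          have : 2 ^ (k + 1) * d % 2 = 0 := by
            rw [h2]
            exact Nat.mul_mod_left _ _
          rw [this]
          rfl

theorem stripB_pow (t d : Nat) (hd : d % 2 = 1) (s : Int) :
    stripB ((2 ^ t * d : Nat) : Int) s = ((d : Int), s + t) := by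
  rw [stripB, Int.toNat_natCast]
  exact stripBGo_pow t d hd _ s (by omega)

-- ===== VERDICT (by name: the statement is the Claim_ definition above) =====
theorem solve_spec : Claim_equal_solve := by
  intro n hdom hpre
  unfold Spec_solve
  obtain ⟨N, rfl⟩ : ∃ N : Nat, n = (N : Int) :=
    ⟨n.toNat, (Int.toNat_of_nonneg hpre).symm⟩
  have hAiff : isSquare ((N : Int)) =
      (((Nat.sqrt N : Int)) * ((Nat.sqrt N : Int)) == (N : Int)) := by
    simp [isSquare, pow_two]
  by_cases hsq : Nat.sqrt N * Nat.sqrt N = N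
  · have hB : (((Nat.sqrt N : Int)) * ((Nat.sqrt N : Int)) == (N : Int)) = true := by
      rw [beq_iff_eq]; exact_mod_cast hsq
    simp only [solve, solve_alt, Int.toNat_natCast, hAiff, hB, if_true]
  · have hB1 : (((Nat.sqrt N : Int)) * ((Nat.sqrt N : Int)) == (N : Int)) = false := by
      rw [Bool.eq_false_iff, ne_eq, beq_iff_eq]
      intro h
      exact hsq (by exact_mod_cast h)
    have hA1 : isSquare ((N : Int)) = false := by rw [hAiff, hB1]
    by_cases h2 : TwoSq N
    · have hscan := (scan_iff_twoSq N hsq).mpr h2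
      have htp := (twoPtr_iff_twoSq N).mpr h2
      simp only [solve, solve_alt, Int.toNat_natCast, hA1, hB1, hscan, htp,
        Bool.false_eq_true, if_false, if_true]
    · have hscan : ((PySem.List.pyRange 1 (((Nat.sqrt N : Int)) + 1) 1).any
          (fun i => isSquare ((N : Int) - i * i)) = false) := by
        rw [Bool.eq_false_iff]
        intro h
        exact h2 ((scan_iff_twoSq N hsq).mp h)
      have htp : twoPtr (N : Int) 1 (Nat.sqrt N : Int) = false := by
        rw [Bool.eq_false_iff]
        intro h
        exact h2 ((twoPtr_iff_twoSq N).mp h)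
      have hN0 : N ≠ 0 := by
        rintro rfl
        exact hsq (by simp)
      obtain ⟨t, d, hnd, hdecomp⟩ := Nat.exists_eq_pow_mul_and_not_dvd hN0 2 (by norm_num)
      have hd : d % 2 = 1 := by omega
      simp only [solve, solve_alt, Int.toNat_natCast, hA1, hB1, hscan, htp,
        Bool.false_eq_true, if_false]
      rw [hdecomp, stripA_pow t d hd, stripB_pow t d hd 0]
      by_cases ht : t % 2 = 0
      · rw [if_pos ht, zero_add, mod_natCast2, ht]
        simp
      · have ht1 : t % 2 = 1 := by omega
        rw [if_neg ht, zero_add, mod_natCast2, ht1, mod_natCast8]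
        simp
        omega
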